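-- pv_equiv track=rewrite | github.com/FourierAI/sentencesimilarity | src/dataprocess/dataset.py | get_wordset_and_worddict
-- ===== SOURCE A (Python) =====
-- def get_wordset_and_worddict(whole_sents):
--     word_set = set()
--     word_dict = {}
--     index = 0
--     for sent in whole_sents:
--         for word in sent:
--             if word not in word_set:
--                 word_dict[word] = index
--                 word_set.add(word)
--                 index += 1
--     return word_set, word_dict
-- ===== SOURCE B (Python) =====
-- def get_wordset_and_worddict(whole_sents):
--     # backwards overwrite scan: final value per word = its first-occurrence position
--     flat = [word for sent in whole_sents for word in sent]
--     first_pos = {}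
--     for pos, word in reversed(list(enumerate(flat))):
--         first_pos[word] = pos
--     # sort the distinct words by first-occurrence position; ranks are the indices
--     order = sorted(first_pos, key=lambda w: first_pos[w])
--     word_dict = {word: rank for rank, word in enumerate(order)}
--     return set(order), word_dict
-- ===== Notes on version B (the rewrite author's own statement) =====
-- stated objective: alternative
-- what changed: Replaces A's single forward pass (membership set plus running index) with a sort-based algorithm: a backwards overwrite scan over enumerate(flat) records each word's first-occurrence position, then the distinct words are sorted by that position and ranked by enumeration.
import Mathlib
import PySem

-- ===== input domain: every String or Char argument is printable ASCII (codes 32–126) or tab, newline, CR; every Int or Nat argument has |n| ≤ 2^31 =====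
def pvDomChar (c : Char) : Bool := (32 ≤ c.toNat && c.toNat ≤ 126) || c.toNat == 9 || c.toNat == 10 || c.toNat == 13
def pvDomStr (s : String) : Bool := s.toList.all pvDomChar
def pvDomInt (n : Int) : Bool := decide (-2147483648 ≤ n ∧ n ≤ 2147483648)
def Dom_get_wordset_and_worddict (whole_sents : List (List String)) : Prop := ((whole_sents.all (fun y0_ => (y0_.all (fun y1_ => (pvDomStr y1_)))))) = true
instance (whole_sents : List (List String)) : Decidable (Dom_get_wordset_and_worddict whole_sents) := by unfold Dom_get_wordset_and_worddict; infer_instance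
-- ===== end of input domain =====

-- B replaces A's single forward pass (membership set + running index) by a sort-based
-- algorithm: a backwards overwrite scan records each word's first-occurrence position,
-- then the distinct words are SORTED by that position and ranked; alternative, same result.

-- ===== PORT A =====
-- one loop iteration of A's inner 'for word in sent' body
def pvStepA (st : PySem.Set String × PySem.Dict String Int × Int) (word : String) :
    PySem.Set String × PySem.Dict String Int × Int :=
  if PySem.Set.contains st.1 word then st
  else (PySem.Set.add st.1 word, st.2.1.insert word st.2.2, st.2.2 + 1)

def get_wordset_and_worddict (whole_sents : List (List String)) :
    List String × (List (String × Int)) :=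
  let st := whole_sents.foldl (fun st sent => sent.foldl pvStepA st)
    (PySem.Set.empty, PySem.Dict.empty, (0 : Int))
  (st.1, st.2.1.items)

-- ===== PORT B =====
def get_wordset_and_worddict_alt (whole_sents : List (List String)) :
    List String × (List (String × Int)) :=
  let flat := whole_sents.flatMap id
  let first_pos := (PySem.List.enumerate flat).reverse.foldl
      (fun d p => d.insert p.2 p.1) PySem.Dict.empty
  -- 'first_pos[w]': w ranges over first_pos's own keys, so the lookup always succeeds
  -- and 'getD … 0' is exact here
  let order := PySem.List.sorted first_pos.keys (fun w => first_pos.getD w 0)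
  (PySem.Set.ofList order, (PySem.List.enumerate order).map (fun p => (p.2, p.1)))

-- ===== PRECONDITION & SPEC =====
def Spec_get_wordset_and_worddict (whole_sents : List (List String)) (out : List String × (List (String × Int))) : Prop := out = get_wordset_and_worddict_alt whole_sents
instance (whole_sents : List (List String)) (out : List String × (List (String × Int))) : Decidable (Spec_get_wordset_and_worddict whole_sents out) := by unfold Spec_get_wordset_and_worddict; infer_instance

-- ===== CLAIM (what is proved, stated in full; the proofs are below) =====
def Claim_equal_get_wordset_and_worddict : Prop := ∀ (whole_sents : List (List String)), Dom_get_wordset_and_worddict whole_sents → Spec_get_wordset_and_worddict whole_sents (get_wordset_and_worddict whole_sents)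

-- ===== LEMMAS AND PROOFS =====

-- ---- A side: characterize A's fold (ordered dedup + enumerate) ----

-- Set.update only appends elements
lemma update_prefix (xs : List String) : ∀ (s : PySem.Set String),
    ∃ t, PySem.Set.update s xs = s ++ t := by
  induction xs with
  | nil => intro s; exact ⟨[], by simp [PySem.Set.update]⟩
  | cons x xs ih =>
    intro s
    by_cases hx : x ∈ s
    · obtain ⟨t, ht⟩ := ih s
      exact ⟨t, by simpa [PySem.Set.update, PySem.Set.add, hx] using ht⟩
    · obtain ⟨t, ht⟩ := ih (s ++ [x])
      exact ⟨x :: t, by simpa [PySem.Set.update, PySem.Set.add, hx] using ht⟩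

-- characterization of A's inner fold over a flat word list
lemma loop_spec (xs : List String) : ∀ (s : PySem.Set String) (d : List (String × Int)) (i : Int),
    d.map Prod.fst = s →
    xs.foldl pvStepA (s, PySem.Dict.mk d, i) =
      (PySem.Set.update s xs,
       PySem.Dict.mk (d ++ (PySem.List.enumerate ((PySem.Set.update s xs).drop s.length) i).map
          (fun p => (p.2, p.1))),
       i + ((PySem.Set.update s xs).length : Int) - (s.length : Int)) := by
  induction xs with
  | nil =>
    intro s d i hk
    simp [PySem.Set.update]
  | cons x xs ih =>
    intro s d i hk
    by_cases h : PySem.Set.contains s x = true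
    · have hx : x ∈ s := by simpa using h
      have hupd : PySem.Set.update s (x :: xs) = PySem.Set.update s xs := by
        simp [PySem.Set.update, PySem.Set.add, hx]
      rw [hupd]
      have := ih s d i hk
      simpa [pvStepA, hx] using this
    · have hx : x ∉ s := by simpa using h
      have hnc : (PySem.Dict.mk d).contains x = false := by
        have hxk : x ∉ (PySem.Dict.mk d).keys := by
          simpa [PySem.Dict.keys_mk, hk] using hx
        simpa [PySem.Dict.contains_eq_decide_mem_keys] using hxk
      have hins : (PySem.Dict.mk d).insert x i = PySem.Dict.mk (d ++ [(x, i)]) := by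
        apply PySem.Dict.ext
        simp [PySem.Dict.items_insert, hnc]
      have hk' : (d ++ [(x, i)]).map Prod.fst = s ++ [x] := by simp [hk]
      have hadd : PySem.Set.add s x = s ++ [x] := by simp [PySem.Set.add, hx]
      have hupd : PySem.Set.update s (x :: xs) = PySem.Set.update (s ++ [x]) xs := by
        simp [PySem.Set.update, hadd]
      obtain ⟨t, ht⟩ := update_prefix xs (s ++ [x])
      have hfold := ih (s ++ [x]) (d ++ [(x, i)]) (i + 1) hk'
      simp only [List.foldl_cons, pvStepA]
      rw [if_neg h, hadd, hins, hfold, hupd, ht]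
      refine Prod.ext ?_ (Prod.ext ?_ ?_)
      · rfl
      · show PySem.Dict.mk _ = PySem.Dict.mk _
        congr 1
        have h1 : ((s ++ [x]) ++ t).drop (s ++ [x]).length = t := by
          simp
        have h2 : ((s ++ [x]) ++ t).drop s.length = x :: t := by
          rw [List.append_assoc, List.singleton_append, List.drop_append_of_le_length (by simp)]
          simp
        rw [h1, h2, PySem.List.enumerate_cons]
        simp
      · show _ = _
        simp only [List.length_append, List.length_singleton]
        push_cast
        ring

-- ---- B side: the backwards scan and the sort ----

-- first-occurrence dedup, structurally
def pyDedup : List String → List String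
  | [] => []
  | x :: xs => x :: (pyDedup xs).filter (fun y => y ≠ x)

-- first-occurrence index
def fIdx (w : String) : List String → Int
  | [] => 0
  | x :: xs => if w = x then 0 else fIdx w xs + 1

-- the backwards-scan dictionary, structurally
def pvG : List String → Int → PySem.Dict String Int
  | [], _ => PySem.Dict.empty
  | x :: xs, s => (pvG xs (s + 1)).insert x s

lemma mem_pyDedup (w : String) (l : List String) : w ∈ pyDedup l ↔ w ∈ l := by
  induction l with
  | nil => simp [pyDedup]
  | cons x xs ih =>
    by_cases hw : w = x <;> simp [pyDedup, List.mem_filter, hw, ih]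

lemma nodup_pyDedup (l : List String) : (pyDedup l).Nodup := by
  induction l with
  | nil => simp [pyDedup]
  | cons x xs ih =>
    refine List.Nodup.cons ?_ (ih.filter _)
    intro h
    exact (by simpa using (List.mem_filter.mp h).2 : ¬ x = x) rfl

lemma filter_filter_ne (P : List String) (x : String) (s : List String) (hx : x ∈ s) :
    ((pyDedup P).filter (fun y => y ≠ x)).filter (fun y => y ∉ s)
      = (pyDedup P).filter (fun y => y ∉ s) := by
  rw [List.filter_filter]
  apply List.filter_congr
  intro y _
  by_cases hy : y ∈ s
  · simp [hy]
  · have : y ≠ x := fun h => hy (h ▸ hx)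
    simp [hy, this]

lemma update_eq_pyDedup (l : List String) : ∀ (s : PySem.Set String),
    PySem.Set.update s l = s ++ (pyDedup l).filter (fun y => y ∉ s) := by
  induction l with
  | nil => intro s; simp [PySem.Set.update, pyDedup]
  | cons x xs ih =>
    intro s
    by_cases hx : x ∈ s
    · have hadd : PySem.Set.add s x = s := by simp [PySem.Set.add, hx]
      have hstep : PySem.Set.update s (x :: xs) = PySem.Set.update s xs := by
        simp [PySem.Set.update, hadd]
      rw [hstep, ih s, pyDedup]
      have hxx : (decide ¬x ∈ s) = false := by simp [hx]
      rw [List.filter_cons, hxx]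
      simp only [Bool.false_eq_true, if_false]
      rw [filter_filter_ne xs x s hx]
    · have hadd : PySem.Set.add s x = s ++ [x] := by simp [PySem.Set.add, hx]
      have hstep : PySem.Set.update s (x :: xs) = PySem.Set.update (s ++ [x]) xs := by
        simp [PySem.Set.update, hadd]
      rw [hstep, ih (s ++ [x]), pyDedup]
      have hxx : (decide ¬x ∈ s) = true := by simp [hx]
      rw [List.filter_cons, hxx]
      simp only [if_true, List.append_assoc, List.singleton_append]
      congr 2
      rw [List.filter_filter]
      apply List.filter_congr
      intro y hy
      by_cases hys : y ∈ s
      · simp [hys]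
      · by_cases hyx : y = x
        · simp [hyx]
        · simp [hys, hyx]

lemma ofList_eq_pyDedup (l : List String) : PySem.Set.ofList l = pyDedup l := by
  have h := update_eq_pyDedup l []
  simpa [PySem.Set.update, PySem.Set.ofList_eq_foldl] using h

lemma pyDedup_eq_self_of_nodup (l : List String) (h : l.Nodup) : pyDedup l = l := by
  induction l with
  | nil => rfl
  | cons x xs ih =>
    rw [pyDedup, ih (List.Nodup.of_cons h)]
    congr 1
    apply List.filter_eq_self.mpr
    intro y hy
    have : y ≠ x := fun he => (List.nodup_cons.mp h).1 (he ▸ hy)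
    simp [this]

lemma fIdx_nonneg (w : String) (l : List String) : (0:Int) ≤ fIdx w l := by
  induction l with
  | nil => simp [fIdx]
  | cons x xs ih => by_cases h : w = x <;> simp [fIdx, h] <;> try omega

lemma fIdx_pyDedup_pairwise (l : List String) :
    (pyDedup l).Pairwise (fun a b => fIdx a l < fIdx b l) := by
  induction l with
  | nil => simp [pyDedup]
  | cons x xs ih =>
    rw [pyDedup]
    refine List.Pairwise.cons ?_ ?_
    · intro b hb
      have hbx : b ≠ x := by simpa using (List.mem_filter.mp hb).2
      have hf : fIdx x (x :: xs) = 0 := by simp [fIdx]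
      have hb2 : fIdx b (x :: xs) = fIdx b xs + 1 := by simp [fIdx, hbx]
      have h0 : (0:Int) ≤ fIdx b xs := fIdx_nonneg b xs
      omega
    · have hpw := (ih.filter (fun y => decide (y ≠ x)))
      refine hpw.imp_of_mem ?_
      intro a b ha hb hab
      have hax : a ≠ x := by simpa using (List.mem_filter.mp ha).2
      have hbx : b ≠ x := by simpa using (List.mem_filter.mp hb).2
      have ha2 : fIdx a (x :: xs) = fIdx a xs + 1 := by simp [fIdx, hax]
      have hb2 : fIdx b (x :: xs) = fIdx b xs + 1 := by simp [fIdx, hbx]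
      omega

lemma get?_pvG (l : List String) : ∀ (s : Int) (w : String),
    (pvG l s).get? w = if w ∈ l then some (s + fIdx w l) else none := by
  induction l with
  | nil => intro s w; simp [pvG, PySem.Dict.get?_empty]
  | cons x xs ih =>
    intro s w
    rw [pvG, PySem.Dict.get?_insert]
    by_cases hwx : w = x
    · subst hwx
      simp [fIdx]
    · rw [if_neg hwx, ih (s + 1) w, fIdx, if_neg hwx]
      by_cases hw : w ∈ xs
      · simp only [hw, if_pos, List.mem_cons, hwx, false_or]
        congr 1
        ring
      · simp [hw, hwx]

lemma nodup_keys_pvG (l : List String) : ∀ s, (pvG l s).keys.Nodup := by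
  induction l with
  | nil => intro s; simp [pvG, PySem.Dict.keys, PySem.Dict.empty]
  | cons x xs ih =>
    intro s
    exact PySem.Dict.nodup_keys_insert _ _ _ (ih (s + 1))

lemma fold_eq_pvG (l : List String) : ∀ (s : Int),
    (PySem.List.enumerate l s).reverse.foldl (fun d p => d.insert p.2 p.1) PySem.Dict.empty
      = pvG l s := by
  induction l with
  | nil => intro s; simp [PySem.List.enumerate_nil, pvG]
  | cons x xs ih =>
    intro s
    rw [PySem.List.enumerate_cons, List.reverse_cons, List.foldl_append, ih (s + 1), pvG]
    rfl

lemma mem_keys_pvG (l : List String) (s : Int) (w : String) :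
    w ∈ (pvG l s).keys ↔ w ∈ l := by
  rw [← not_iff_not, ← PySem.Dict.get?_eq_none_iff_not_mem_keys, get?_pvG]
  by_cases h : w ∈ l <;> simp [h]

lemma sorted_keys_pvG (l : List String) :
    PySem.List.sorted (pvG l 0).keys (fun w => (pvG l 0).getD w 0) = pyDedup l := by
  apply PySem.List.sorted_eq_of_perm_of_pairwise_lt
  · rw [List.perm_ext_iff_of_nodup (nodup_pyDedup l) (nodup_keys_pvG l 0)]
    intro a
    rw [mem_keys_pvG, mem_pyDedup]
  · refine (fIdx_pyDedup_pairwise l).imp_of_mem ?_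
    intro a b ha hb hab
    have ha' : a ∈ l := (mem_pyDedup a l).mp ha
    have hb' : b ∈ l := (mem_pyDedup b l).mp hb
    rw [PySem.Dict.getD_eq_get?_getD, PySem.Dict.getD_eq_get?_getD,
      get?_pvG, get?_pvG, if_pos ha', if_pos hb']
    simpa using hab

-- ===== VERDICT (by name: the statement is the Claim_ definition above) =====
theorem get_wordset_and_worddict_spec : Claim_equal_get_wordset_and_worddict := by
  intro ws _
  show _ = _
  have hflat : ws.foldl (fun st sent => sent.foldl pvStepA st)
      (PySem.Set.empty, PySem.Dict.empty, (0 : Int))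
      = (ws.flatMap id).foldl pvStepA (PySem.Set.empty, PySem.Dict.empty, (0 : Int)) := by
    rw [List.flatMap_id, List.foldl_flatten]
  have hmain := loop_spec (ws.flatMap id) [] [] 0 (by simp)
  unfold get_wordset_and_worddict get_wordset_and_worddict_alt
  dsimp only
  rw [hflat]
  have hemp : (PySem.Set.empty : PySem.Set String) = ([] : List String) := rfl
  have hdemp : (PySem.Dict.empty : PySem.Dict String Int) = PySem.Dict.mk [] := rfl
  rw [hemp]
  rw [fold_eq_pvG, sorted_keys_pvG]
  rw [hdemp, hmain]
  have hup : PySem.Set.update ([] : PySem.Set String) (ws.flatMap id) = pyDedup (ws.flatMap id) := by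
    rw [show PySem.Set.update ([] : PySem.Set String) (ws.flatMap id)
          = PySem.Set.ofList (ws.flatMap id) from rfl, ofList_eq_pyDedup]
  rw [hup]
  rw [ofList_eq_pyDedup, pyDedup_eq_self_of_nodup _ (nodup_pyDedup _)]
  simp
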